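-- pv_equiv track=rewrite | github.com/manuorsv/AC | actividad1-Manuel-Ortega-Salvador.py | digito_pos_n
-- ===== SOURCE A (Python) =====
-- def digito_pos_n(n):
--     if(n < 10):
--         return n
--     else:
--         #Inicializamos la última posición para los enteros de dos cifras
--         aux_pos = 9
--         #Inicializamos el último número entero de una cifra
--         aux_num = 9
--         cifras = 1
--         while(aux_pos < n):
--             cifras += 1
--             #Calcula el siguiente nivel (última posición ocupada por los enteros con tantas cifras)
--             next_aux = aux_pos + 9 * 10**(cifras-1) * cifras
--             #Igual con el último número de tantas cifras del siguiente nivel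
--             next_aux_num = aux_num * 10 + 9
--             if(n <= next_aux):
--                 break
--             else:
--                 aux_num = next_aux_num
--                 aux_pos = next_aux
--         #Estamos calculando una especie de offset a partir de la última posición ocupada del nivel anterior
--         n_aux = n-aux_pos-1
--         pos_cifra = n_aux % cifras
--         pos_relativo_num = n_aux // cifras
--         num = pos_relativo_num + aux_num + 1
--         div = num
--         for i in range(cifras-pos_cifra):
--             if(div<10):
--                 cifra = div
--             else:
--                 cifra = div % 10
--             div = div // 10
--         return cifra
-- ===== SOURCE B (Python) =====
-- def digito_pos_n(n):
--     if n < 10: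
--         return n
--
--     def ndigits(m):
--         d, p = 1, 10
--         while p <= m:
--             d += 1
--             p *= 10
--         return d, p
--
--     def total(m):
--         # number of digits in the string "012...m"
--         d, p = ndigits(m)
--         return d * (m + 1) - (p - 1) // 9 + 1
--
--     # exponential + binary search for the number m containing position n
--     lo, hi = 0, 1
--     while total(hi) <= n:
--         hi *= 2
--     while lo < hi:
--         mid = (lo + hi) // 2
--         if total(mid) <= n:
--             lo = mid + 1
--         else:
--             hi = mid
--     m = lo
--     return m // 10 ** (total(m) - 1 - n) % 10
-- ===== Notes on version B (the rewrite author's own statement) =====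
-- stated objective: alternative
-- what changed: B locates the number containing position n by exponential-plus-binary search on a closed-form prefix-digit-count total(m) = d*(m+1) - (10^d-1)//9 + 1, instead of A's linear walk over digit-length regions with look-ahead/break and a right-to-left digit-peeling loop.
import Mathlib
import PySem

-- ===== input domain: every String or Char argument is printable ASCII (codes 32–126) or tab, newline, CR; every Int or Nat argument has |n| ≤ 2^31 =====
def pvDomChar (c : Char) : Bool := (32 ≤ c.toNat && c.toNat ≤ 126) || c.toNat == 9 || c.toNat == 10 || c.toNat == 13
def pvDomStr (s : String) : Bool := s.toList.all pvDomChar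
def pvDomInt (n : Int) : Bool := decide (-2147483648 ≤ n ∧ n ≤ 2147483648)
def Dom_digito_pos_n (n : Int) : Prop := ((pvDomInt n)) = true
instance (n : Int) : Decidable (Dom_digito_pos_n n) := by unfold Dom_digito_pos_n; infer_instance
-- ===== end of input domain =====

-- B replaces A's linear walk over digit-length regions (with look-ahead/break) and its
-- right-to-left digit-peeling loop by an exponential + binary search on a closed-form
-- prefix-digit-count function (a different algorithm of similar cost).

-- ===== PORT A =====
-- A's while loop; 'cifras' is A's digit-length counter, always ≥ 1 in A, kept as Nat so the
-- exponent 10**(cifras-1) and termination are direct; returns (cifras, aux_pos, aux_num).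
def digitoLoopA (n aux_pos aux_num : Int) (cifras : Nat) : Nat × Int × Int :=
  if aux_pos < n then
    -- cifras += 1;  next_aux = aux_pos + 9 * 10**(cifras-1) * cifras  (with the incremented cifras)
    let next_aux := aux_pos + 9 * (10:Int) ^ cifras * (cifras + 1)
    let next_aux_num := aux_num * 10 + 9
    if n ≤ next_aux then (cifras + 1, aux_pos, aux_num)       -- break
    else digitoLoopA n next_aux next_aux_num (cifras + 1)
  else (cifras, aux_pos, aux_num)
  termination_by (n - aux_pos).toNat
  decreasing_by
    have : (0:Int) < 9 * (10:Int) ^ cifras * (cifras + 1) := by positivity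
    omega

def digito_pos_n (n : Int) : Int :=
  if n < 10 then n
  else
    let s := digitoLoopA n 9 9 1
    let cifras := s.1
    let n_aux := n - s.2.1 - 1
    let pos_cifra := PySem.Int.mod n_aux (cifras : Int)
    let pos_relativo_num := PySem.Int.floordiv n_aux (cifras : Int)
    let num := pos_relativo_num + s.2.2 + 1
    -- for i in range(cifras - pos_cifra): …  (the count is ≥ 1 here, so 'cifra' is always set;
    -- .toNat is exact: cifras - pos_cifra ≥ 1 whenever this branch runs)
    (
      (List.range ((cifras : Int) - pos_cifra).toNat).foldl
        (fun (st : Int × Int) _ =>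
          let cifra := if st.1 < 10 then st.1 else PySem.Int.mod st.1 10
          (PySem.Int.floordiv st.1 10, cifra))
        (num, 0)
    ).2

-- ===== PORT B =====
-- B's ndigits helper: d, p = 1, 10; while p <= m: d += 1; p *= 10; returns (d, p).
-- The '1 ≤ p' conjunct is a totality guard only: p starts at 10 and only grows.
def ndLoop (m d p : Int) : Int × Int :=
  if p ≤ m ∧ 1 ≤ p then ndLoop m (d + 1) (p * 10) else (d, p)
  termination_by (m + 1 - p).toNat
  decreasing_by omega

-- B's total(m): digits in "012...m"; (p-1)//9 is Python's floor division.
def totalB (m : Int) : Int :=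
  let dp := ndLoop m 1 10
  dp.1 * (m + 1) - PySem.Int.floordiv (dp.2 - 1) 9 + 1

-- B's 'while total(hi) <= n: hi *= 2'.  The conjuncts '1 ≤ hi ∧ hi < n' are totality guards
-- only: hi starts at 1 and doubles, and totalB hi > hi always (totalB_gt_self below), so
-- totalB hi ≤ n already implies hi < n.
def expandHi (n hi : Int) : Int :=
  if totalB hi ≤ n ∧ 1 ≤ hi ∧ hi < n then expandHi n (hi * 2) else hi
  termination_by (n - hi).toNat
  decreasing_by omega

-- B's binary-search loop over [lo, hi).
def bisect (n lo hi : Int) : Int :=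
  if lo < hi then
    let mid := PySem.Int.floordiv (lo + hi) 2
    if totalB mid ≤ n then bisect n (mid + 1) hi else bisect n lo mid
  else lo
  termination_by (hi - lo).toNat
  decreasing_by
  · have := (PySem.Int.floordiv_two_mid_bounds (lo := lo) (hi := hi) (by omega)).1
    omega
  · have := (PySem.Int.floordiv_lt_iff_lt_mul (a := lo + hi) (b := 2) (q := hi)
      (by norm_num)).mpr (by omega)
    omega

def digito_pos_n_alt (n : Int) : Int :=
  if n < 10 then n
  else
    let m := bisect n 0 (expandHi n 1)
    -- 10 ** (total(m) - 1 - n): the exponent is ≥ 0 here, so .toNat is exact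
    PySem.Int.mod (PySem.Int.floordiv m ((10:Int) ^ (totalB m - 1 - n).toNat)) 10

-- ===== PRECONDITION & SPEC =====
def Spec_digito_pos_n (n : Int) (out : Int) : Prop := out = digito_pos_n_alt n
instance (n : Int) (out : Int) : Decidable (Spec_digito_pos_n n out) := by unfold Spec_digito_pos_n; infer_instance

-- ===== CLAIM (what is proved, stated in full; the proofs are below) =====
def Claim_equal_digito_pos_n : Prop := ∀ (n : Int), Dom_digito_pos_n n → Spec_digito_pos_n n (digito_pos_n n)

-- ===== LEMMAS AND PROOFS =====

-- The repunit (10^c - 1)/9, division-free.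
def rep : Nat → Int
  | 0 => 0
  | c + 1 => 10 * rep c + 1

lemma nine_rep (c : Nat) : 9 * rep c = 10 ^ c - 1 := by
  induction c with
  | zero => simp [rep]
  | succ c ih => simp only [rep, pow_succ]; linarith

lemma rep_succ' (c : Nat) : rep (c + 1) = 10 ^ c + rep c := by
  have h1 := nine_rep (c + 1)
  have h2 := nine_rep c
  have : (10:Int) ^ (c + 1) = 10 * 10 ^ c := by ring
  omega

lemma ndLoop_run (m : Int) (c : Nat) (h1 : (10:Int) ^ c ≤ m) (h2 : m < (10:Int) ^ (c + 1)) :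
    ∀ (j k : Nat), k + j = c → ndLoop m ((k:Int) + 1) ((10:Int) ^ (k + 1)) = ((c:Int) + 1, (10:Int) ^ (c + 1)) := by
  intro j
  induction j with
  | zero =>
    intro k hk
    have hkc : k = c := by omega
    subst hkc
    rw [ndLoop, if_neg (by push_neg; intro hcon; omega)]
  | succ j ih =>
    intro k hk
    have hkc : k + 1 ≤ c := by omega
    have hp : (10:Int) ^ (k + 1) ≤ 10 ^ c := by
      apply pow_le_pow_right₀ (by norm_num) hkc
    rw [ndLoop, if_pos ⟨le_trans hp h1, one_le_pow₀ (by norm_num)⟩]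
    have he : (10:Int) ^ (k + 1) * 10 = 10 ^ (k + 2) := by ring
    have h' := ih (k + 1) (by omega)
    rw [he]
    push_cast at h' ⊢
    convert h' using 3

lemma ndLoop_top (m : Int) (c : Nat) (h1 : (10:Int) ^ c ≤ m) (h2 : m < (10:Int) ^ (c + 1)) :
    ndLoop m 1 10 = ((c:Int) + 1, (10:Int) ^ (c + 1)) := by
  have := ndLoop_run m c h1 h2 c 0 (by omega)
  simpa using this

lemma totalB_closed (m : Int) (c : Nat) (h1 : (10:Int) ^ c ≤ m) (h2 : m < (10:Int) ^ (c + 1)) :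
    totalB m = ((c:Int) + 1) * (m + 1) - rep (c + 1) + 1 := by
  unfold totalB
  rw [ndLoop_top m c h1 h2]
  have h9 : (10:Int) ^ (c + 1) - 1 = 9 * rep (c + 1) := by
    have := nine_rep (c + 1); omega
  simp only [h9]
  rw [PySem.Int.floordiv_eq_ediv_of_pos (by norm_num)]
  rw [Int.mul_ediv_cancel_left _ (by norm_num)]

lemma ndLoop_small (m : Int) (h : m < 10) : ndLoop m 1 10 = (1, 10) := by
  rw [ndLoop, if_neg (by omega)]

lemma totalB_small (m : Int) (h : m < 10) : totalB m = m + 1 := by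
  unfold totalB
  rw [ndLoop_small m h]
  norm_num [PySem.Int.floordiv_eq_ediv_of_pos]

lemma exists_digits (m : Int) (h : 1 ≤ m) :
    ∃ c : Nat, (10:Int) ^ c ≤ m ∧ m < (10:Int) ^ (c + 1) := by
  have hm : ((m.toNat : Int)) = m := Int.toNat_of_nonneg (by omega)
  refine ⟨Nat.log 10 m.toNat, ?_, ?_⟩
  · have h1 := Nat.pow_log_le_self 10 (x := m.toNat) (by omega)
    calc ((10:Int) ^ Nat.log 10 m.toNat) = ((10 ^ Nat.log 10 m.toNat : Nat) : Int) := by push_cast; ring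
    _ ≤ (m.toNat : Int) := by exact_mod_cast h1
    _ = m := hm
  · have h2 := Nat.lt_pow_succ_log_self (b := 10) (by norm_num) m.toNat
    calc m = (m.toNat : Int) := hm.symm
    _ < ((10 ^ (Nat.log 10 m.toNat + 1) : Nat) : Int) := by exact_mod_cast h2
    _ = (10:Int) ^ (Nat.log 10 m.toNat + 1) := by push_cast; ring

lemma totalB_gt_self (m : Int) (h : 0 ≤ m) : m < totalB m := by
  rcases eq_or_lt_of_le h with h0 | h1
  · rw [← h0, totalB_small 0 (by norm_num)]; norm_num
  · obtain ⟨c, hc1, hc2⟩ := exists_digits m h1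
    rw [totalB_closed m c hc1 hc2]
    have h9 := nine_rep (c + 1)
    have hX1 : (1:Int) ≤ 10 ^ c := one_le_pow₀ (by norm_num)
    have hXs : (10:Int) ^ (c + 1) = 10 * 10 ^ c := by ring
    -- 9*goal: 9cm + 9c + 19 > 10 * 10^c, using m ≥ 10^c
    match c, hc1, hc2, h9, hX1, hXs with
    | 0, hc1, hc2, h9, hX1, hXs => norm_num [rep] at hc1 ⊢; try omega
    | 1, hc1, hc2, h9, hX1, hXs => norm_num [rep] at hc1 ⊢; try omega
    | (c + 2), hc1, hc2, h9, hX1, hXs =>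
      have hK : (0:Int) ≤ (c:Int) := Int.natCast_nonneg c
      have hcm : ((c:Int) + 2) * m ≥ 2 * (10:Int) ^ (c + 2) := by nlinarith
      have h9' : 9 * rep (c + 2 + 1) = 10 * (10:Int) ^ (c + 2) - 1 := by rw [h9, hXs]
      by_contra hcon
      push_neg at hcon
      push_cast at hcon
      have e' : ((c:Int) + 2 + 1) * (m + 1) = ((c:Int) + 2) * m + m + (c:Int) + 3 := by ring
      linarith [hcm, h9', hX1, hK, hcon, e']

lemma totalB_step (m : Int) (h : 0 ≤ m) : totalB m ≤ totalB (m + 1) := by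
  rcases eq_or_lt_of_le h with h0 | h1
  · rw [← h0]
    have e : (0:Int) + 1 = 1 := by norm_num
    rw [e, totalB_small 0 (by norm_num), totalB_small 1 (by norm_num)]
    norm_num
  · obtain ⟨c, hc1, hc2⟩ := exists_digits m h1
    rw [totalB_closed m c hc1 hc2]
    rcases lt_or_ge (m + 1) ((10:Int) ^ (c + 1)) with hlt | hge
    · rw [totalB_closed (m + 1) c (by omega) hlt]
      nlinarith [Int.natCast_nonneg c]
    · have heq : m + 1 = (10:Int) ^ (c + 1) := by omega
      have hlt2 : m + 1 < (10:Int) ^ (c + 2) := by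
        rw [heq]
        have : (10:Int) ^ (c + 2) = 10 * 10 ^ (c + 1) := by ring
        nlinarith [one_le_pow₀ (M₀ := Int) (n := c + 1) (show (1:Int) ≤ 10 by norm_num)]
      rw [totalB_closed (m + 1) (c + 1) (by omega) hlt2]
      have hr := rep_succ' (c + 1)
      rw [hr, ← heq]
      push_cast
      nlinarith [Int.natCast_nonneg c]

lemma totalB_mono (a b : Int) (ha : 0 ≤ a) (hab : a ≤ b) : totalB a ≤ totalB b := by
  induction b, hab using Int.le_induction with
  | base => exact le_refl _
  | succ b hb ih => exact le_trans ih (totalB_step b (by omega))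

-- the binary search's postcondition: m is the first number whose prefix ends past n
def FoundAt (n m : Int) : Prop := 0 ≤ m ∧ n < totalB m ∧ (m = 0 ∨ totalB (m - 1) ≤ n)

lemma found_unique (n x y : Int) (hx : FoundAt n x) (hy : FoundAt n y) : x = y := by
  obtain ⟨hx0, hx1, hx2⟩ := hx
  obtain ⟨hy0, hy1, hy2⟩ := hy
  by_contra hne
  rcases lt_trichotomy x y with h | h | h
  · rcases hy2 with h0 | h2
    · omega
    · have := totalB_mono x (y - 1) hx0 (by omega)
      omega
  · exact hne h
  · rcases hx2 with h0 | h2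
    · omega
    · have := totalB_mono y (x - 1) hy0 (by omega)
      omega

lemma expandHi_spec (n : Int) : ∀ hi : Int, 1 ≤ hi →
    1 ≤ expandHi n hi ∧ n < totalB (expandHi n hi) := by
  intro hi
  induction hi using expandHi.induct n with
  | case1 hi hc ih =>
    intro _
    rw [expandHi, if_pos hc]
    exact ih (by omega)
  | case2 hi hc =>
    intro h1
    rw [expandHi, if_neg hc]
    refine ⟨h1, ?_⟩
    by_contra hle
    push_neg at hle
    have := totalB_gt_self hi (by omega)
    exact hc ⟨hle, h1, by omega⟩

lemma bisect_spec (n : Int) : ∀ lo hi : Int, 0 ≤ lo → lo ≤ hi →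
    (lo = 0 ∨ totalB (lo - 1) ≤ n) → n < totalB hi → FoundAt n (bisect n lo hi) := by
  intro lo hi
  induction lo, hi using bisect.induct n with
  | case1 lo hi hlt mid hmid ih =>
    intro h0 _ _ hhi
    rw [bisect, if_pos hlt]
    simp only [mid] at hmid ih ⊢
    rw [if_pos hmid]
    have hb := PySem.Int.floordiv_two_mid_bounds (lo := lo) (hi := hi) (le_of_lt hlt)
    have hlt2 := (PySem.Int.floordiv_lt_iff_lt_mul (a := lo + hi) (b := 2) (q := hi)
      (by norm_num)).mpr (by omega)
    exact ih (by omega) (by omega) (Or.inr (by simpa using hmid)) hhi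
  | case2 lo hi hlt mid hmid ih =>
    intro h0 hle hlo hhi
    rw [bisect, if_pos hlt]
    simp only [mid] at hmid ih ⊢
    rw [if_neg hmid]
    have hb := PySem.Int.floordiv_two_mid_bounds (lo := lo) (hi := hi) (le_of_lt hlt)
    push_neg at hmid
    exact ih h0 (by omega) hlo (by omega)
  | case3 lo hi hnlt =>
    intro h0 hle hlo hhi
    rw [bisect, if_neg hnlt]
    have : lo = hi := by omega
    exact ⟨h0, this ▸ hhi, hlo⟩

-- A's loop, characterized: it returns (c+1, P, A) with A the last c-digit number,
-- P the index of the last digit of A in the stream, and n inside the (c+1)-digit region.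
lemma loopA_char (n : Int) : ∀ (aux_pos aux_num : Int) (k : Nat),
    aux_pos < n → 1 ≤ k → aux_num + 1 = (10:Int) ^ k →
    9 * aux_pos = 9 * k * (10:Int) ^ k - (10:Int) ^ k + 1 →
    ∃ c : Nat, 1 ≤ c ∧
      (digitoLoopA n aux_pos aux_num k).1 = c + 1 ∧
      (digitoLoopA n aux_pos aux_num k).2.2 + 1 = (10:Int) ^ c ∧
      9 * (digitoLoopA n aux_pos aux_num k).2.1 = 9 * c * (10:Int) ^ c - (10:Int) ^ c + 1 ∧
      (digitoLoopA n aux_pos aux_num k).2.1 < n ∧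
      n ≤ (digitoLoopA n aux_pos aux_num k).2.1 + 9 * (10:Int) ^ c * (c + 1) := by
  intro aux_pos aux_num k
  induction aux_pos, aux_num, k using digitoLoopA.induct n with
  | case1 aux_pos aux_num cifras hlt na hbrk =>
    intro _ hk h2 h3
    rw [digitoLoopA, if_pos hlt, if_pos hbrk]
    exact ⟨cifras, hk, rfl, h2, h3, hlt, by simpa [na] using hbrk⟩
  | case2 aux_pos aux_num cifras hlt na nan hbrk ih =>
    intro _ hk h2 h3
    rw [digitoLoopA, if_pos hlt, if_neg hbrk]
    simp only [na, nan] at hbrk ih ⊢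
    push_neg at hbrk
    refine ih hbrk (by omega) (by push_cast [pow_succ]; linarith) ?_
    push_cast [pow_succ]
    linear_combination h3
  | case3 aux_pos aux_num cifras hnlt =>
    intro h1 _ _ _
    exact absurd h1 hnlt

-- The div component of A's peeling loop after t steps, for nonnegative input.
lemma peel_fst (t : Nat) (x c0 : Int) (hx : 0 ≤ x) :
    ((List.range t).foldl
        (fun (st : Int × Int) _ =>
          let cifra := if st.1 < 10 then st.1 else PySem.Int.mod st.1 10
          (PySem.Int.floordiv st.1 10, cifra)) (x, c0)).1 = x / (10:Int) ^ t := by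
  induction t generalizing c0 with
  | zero => simp
  | succ t ih =>
    rw [List.range_succ, List.foldl_append]
    simp only [List.foldl_cons, List.foldl_nil]
    rw [ih c0]
    rw [PySem.Int.floordiv_eq_ediv_of_pos (by norm_num)]
    obtain ⟨m, rfl⟩ := Int.eq_ofNat_of_zero_le hx
    have h : (m / 10 ^ t / 10 : Nat) = m / 10 ^ (t + 1) := by
      rw [Nat.div_div_eq_div_mul, ← pow_succ]
    exact_mod_cast h

-- The returned digit of A's peeling loop after t+1 steps equals the closed form.
lemma peel_snd (t : Nat) (x c0 : Int) (hx : 0 ≤ x) :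
    ((List.range (t + 1)).foldl
        (fun (st : Int × Int) _ =>
          let cifra := if st.1 < 10 then st.1 else PySem.Int.mod st.1 10
          (PySem.Int.floordiv st.1 10, cifra)) (x, c0)).2 = (x / (10:Int) ^ t) % 10 := by
  rw [List.range_succ, List.foldl_append]
  simp only [List.foldl_cons, List.foldl_nil]
  rw [peel_fst t x c0 hx]
  have hdnn : 0 ≤ x / (10:Int) ^ t := Int.ediv_nonneg hx (by positivity)
  rw [PySem.Int.mod_eq_emod_of_pos (by norm_num)]
  split_ifs with h
  · omega
  · rfl

-- ===== VERDICT (by name: the statement is the Claim_ definition above) =====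
theorem digito_pos_n_spec : Claim_equal_digito_pos_n := by
  intro n _
  unfold Spec_digito_pos_n
  by_cases hn : n < 10
  · simp only [digito_pos_n, digito_pos_n_alt, if_pos hn]
  · simp only [digito_pos_n, digito_pos_n_alt, if_neg hn]
    have h9n : (9:Int) < n := by omega
    obtain ⟨c, hc1, hC, hA, hP, hPn, hn2⟩ :=
      loopA_char n 9 9 1 h9n (le_refl 1) (by norm_num) (by norm_num)
    set s := digitoLoopA n 9 9 1 with hs
    have hX1 : (1:Int) ≤ 10 ^ c := one_le_pow₀ (by norm_num)
    have hK0 : (0:Int) ≤ (c:Int) := Int.natCast_nonneg c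
    have hXs : (10:Int) ^ (c + 1) = 10 * 10 ^ c := by ring
    have hrep9 : 9 * rep (c + 1) = 10 * (10:Int) ^ c - 1 := by
      rw [nine_rep, hXs]
    rw [hC]
    have hcast : ((c + 1 : Nat) : Int) = (c:Int) + 1 := by push_cast; ring
    rw [hcast]
    have hA' : s.2.2 = (10:Int) ^ c - 1 := by omega
    rw [hA']
    set na := n - s.2.1 - 1 with hna
    have hna0 : 0 ≤ na := by omega
    have hKpos : (0:Int) < (c:Int) + 1 := by omega
    rw [PySem.Int.mod_eq_emod_of_pos hKpos, PySem.Int.floordiv_eq_ediv_of_pos hKpos]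
    set r := na % ((c:Int) + 1) with hr
    set q := na / ((c:Int) + 1) with hq
    have hr0 : 0 ≤ r := by rw [hr]; exact Int.emod_nonneg _ (by omega)
    have hr1 : r < (c:Int) + 1 := by rw [hr]; exact Int.emod_lt_of_pos _ hKpos
    have hqr : ((c:Int) + 1) * q + r = na := by rw [hq, hr]; exact Int.mul_ediv_add_emod na _
    have hq0 : 0 ≤ q := by rw [hq]; exact Int.ediv_nonneg hna0 (by omega)
    have hna1 : na < 9 * 10 ^ c * ((c:Int) + 1) := by omega
    have hq9 : q < 9 * 10 ^ c := by
      by_contra hcon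
      push_neg at hcon
      have h1 : 9 * 10 ^ c * ((c:Int) + 1) ≤ q * ((c:Int) + 1) := by nlinarith
      have h2 : q * ((c:Int) + 1) = ((c:Int) + 1) * q := by ring
      linarith
    set num := q + ((10:Int) ^ c - 1) + 1 with hnumdef
    have hnum' : num = q + 10 ^ c := by omega
    have hnum0 : 0 ≤ num := by omega
    -- A's peeling loop: count = (c + 1 - r).toNat = (c - r).toNat + 1
    have hcount : ((c:Int) + 1 - r).toNat = ((c:Int) - r).toNat + 1 := by omega
    rw [hcount, peel_snd (((c:Int) - r).toNat) num 0 hnum0]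
    -- B's search returns exactly num
    obtain ⟨hhi1, hhi2⟩ := expandHi_spec n 1 (le_refl 1)
    have hfound := bisect_spec n 0 (expandHi n 1) (le_refl 0) (by omega) (Or.inl rfl) hhi2
    set m := bisect n 0 (expandHi n 1) with hm
    have htot : totalB num = s.2.1 + 1 + (q + 1) * ((c:Int) + 1) := by
      rw [totalB_closed num c (by omega) (by rw [hXs]; omega)]
      have h99 : 9 * (((c:Int) + 1) * (num + 1) - rep (c + 1) + 1)
          = 9 * (s.2.1 + 1 + (q + 1) * ((c:Int) + 1)) := by
        rw [hnum']
        linear_combination -hrep9 - hP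
      linarith
    have hexpand : (q + 1) * ((c:Int) + 1) = ((c:Int) + 1) * q + (c:Int) + 1 := by ring
    have htot1 : n < totalB num := by rw [htot]; omega
    have htot0 : totalB (num - 1) ≤ n := by
      rcases eq_or_lt_of_le hq0 with hq0' | hq1
      · -- q = 0 : num - 1 is the last (c)-digit number 10^c - 1
        obtain ⟨c', rfl⟩ : ∃ c', c = c' + 1 := ⟨c - 1, by omega⟩
        push_cast at hP
        have hsplit : (10:Int) ^ (c' + 1) = 10 * 10 ^ c' := by ring
        have hX1' : (1:Int) ≤ 10 ^ c' := one_le_pow₀ (by norm_num)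
        have hb1 : (10:Int) ^ c' ≤ num - 1 := by omega
        have hb2 : num - 1 < 10 ^ (c' + 1) := by omega
        rw [totalB_closed (num - 1) c' hb1 hb2]
        have hrep9' : 9 * rep (c' + 1) = (10:Int) ^ (c' + 1) - 1 := nine_rep (c' + 1)
        have h99 : 9 * (((c':Int) + 1) * ((num - 1) + 1) - rep (c' + 1) + 1)
            = 9 * (s.2.1 + 1) := by
          have hnum'' : num = (10:Int) ^ (c' + 1) := by omega
          rw [hnum'']
          linear_combination -hrep9' - hP
        linarith
      · -- q ≥ 1 : num - 1 still has c+1 digits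
        have hb1 : (10:Int) ^ c ≤ num - 1 := by omega
        have hb2 : num - 1 < 10 ^ (c + 1) := by rw [hXs]; omega
        rw [totalB_closed (num - 1) c hb1 hb2]
        have h99 : 9 * (((c:Int) + 1) * ((num - 1) + 1) - rep (c + 1) + 1)
            = 9 * (s.2.1 + 1 + q * ((c:Int) + 1)) := by
          rw [hnum']
          linear_combination -hrep9 - hP
        have hexpand' : q * ((c:Int) + 1) = ((c:Int) + 1) * q := by ring
        linarith
    have hfnum : FoundAt n num := ⟨hnum0, htot1, Or.inr htot0⟩
    have hmn : m = num := found_unique n m num hfound hfnum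
    rw [hmn]
    have hexp : totalB num - 1 - n = (c:Int) - r := by rw [htot]; omega
    rw [hexp]
    rw [PySem.Int.floordiv_eq_ediv_of_pos (by positivity),
        PySem.Int.mod_eq_emod_of_pos (by norm_num)]
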